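-- pv_equiv track=rewrite | github.com/Crazyface18/CS101-Project | milestone1.py | source_rna
-- ===== SOURCE A (Python) =====
-- def source_rna(protein):
--     RNAList = {'UUU':'F', 'CUU':'L', 'AUU':'I', 'GUU':'V',
--     'UUC':'F', 'CUC':'L', 'AUC':'I', 'GUC':'V',
--     'UUA':'L', 'CUA':'L', 'AUA':'I', 'GUA':'V',
--     'UUG':'L', 'CUG':'L', 'AUG':'M', 'GUG':'V',
--     'UCU':'S', 'CCU':'P', 'ACU':'T', 'GCU':'A',
--     'UCC':'S', 'CCC':'P', 'ACC':'T', 'GCC':'A',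
--     'UCA':'S', 'CCA':'P', 'ACA':'T', 'GCA':'A',
--     'UCG':'S', 'CCG':'P', 'ACG':'T', 'GCG':'A',
--     'UAU':'Y', 'CAU':'H', 'AAU':'N', 'GAU':'D',
--     'UAC':'Y', 'CAC':'H', 'AAC':'N', 'GAC':'D',
--     'UAA':' ', 'CAA':'Q', 'AAA':'K', 'GAA':'E',
--     'UAG':' ', 'CAG':'Q', 'AAG':'K', 'GAG':'E',
--     'UGU':'C', 'CGU':'R', 'AGU':'S', 'GGU':'G',
--     'UGC':'C', 'CGC':'R', 'AGC':'S', 'GGC':'G',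
--     'UGA':' ', 'CGA':'R', 'AGA':'R', 'GGA':'G',
--     'UGG':'W', 'CGG':'R', 'AGG':'R', 'GGG':'G',
--     }
--     values = RNAList.values()
--     values_list = list(values)
--     count1 = 0
--     count2 = 1
--     proteinStop = protein + ' '
--     for x in range (0,len(proteinStop)):
--         for i in range (0,len(RNAList)):
--             if values_list[i] == proteinStop[x]:
--                 count1 += 1
--         count2 *= count1
--         count1 = 0
--     return count2
-- ===== SOURCE B (Python) =====
-- def source_rna(protein):
--     RNAList = {'UUU':'F', 'CUU':'L', 'AUU':'I', 'GUU':'V',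
--     'UUC':'F', 'CUC':'L', 'AUC':'I', 'GUC':'V',
--     'UUA':'L', 'CUA':'L', 'AUA':'I', 'GUA':'V',
--     'UUG':'L', 'CUG':'L', 'AUG':'M', 'GUG':'V',
--     'UCU':'S', 'CCU':'P', 'ACU':'T', 'GCU':'A',
--     'UCC':'S', 'CCC':'P', 'ACC':'T', 'GCC':'A',
--     'UCA':'S', 'CCA':'P', 'ACA':'T', 'GCA':'A',
--     'UCG':'S', 'CCG':'P', 'ACG':'T', 'GCG':'A',
--     'UAU':'Y', 'CAU':'H', 'AAU':'N', 'GAU':'D',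
--     'UAC':'Y', 'CAC':'H', 'AAC':'N', 'GAC':'D',
--     'UAA':' ', 'CAA':'Q', 'AAA':'K', 'GAA':'E',
--     'UAG':' ', 'CAG':'Q', 'AAG':'K', 'GAG':'E',
--     'UGU':'C', 'CGU':'R', 'AGU':'S', 'GGU':'G',
--     'UGC':'C', 'CGC':'R', 'AGC':'S', 'GGC':'G',
--     'UGA':' ', 'CGA':'R', 'AGA':'R', 'GGA':'G',
--     'UGG':'W', 'CGG':'R', 'AGG':'R', 'GGG':'G',
--     }
--     # codon count per amino acid, built once
--     codons = {}
--     for aa in RNAList.values():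
--         codons[aa] = codons.get(aa, 0) + 1
--     # frequency of each character of the protein (with the stop space)
--     freq = {}
--     for ch in protein + ' ':
--         freq[ch] = freq.get(ch, 0) + 1
--     result = 1
--     for ch, n in freq.items():
--         result *= codons.get(ch, 0) ** n
--     return result
-- ===== Notes on version B (the rewrite author's own statement) =====
-- stated objective: faster
-- what changed: A scans the 64-entry codon table once per character of the protein; B builds a codon-count dict and a character-frequency dict once and returns the product of codon_count[ch] ** freq[ch] over distinct characters.
import Mathlib
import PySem

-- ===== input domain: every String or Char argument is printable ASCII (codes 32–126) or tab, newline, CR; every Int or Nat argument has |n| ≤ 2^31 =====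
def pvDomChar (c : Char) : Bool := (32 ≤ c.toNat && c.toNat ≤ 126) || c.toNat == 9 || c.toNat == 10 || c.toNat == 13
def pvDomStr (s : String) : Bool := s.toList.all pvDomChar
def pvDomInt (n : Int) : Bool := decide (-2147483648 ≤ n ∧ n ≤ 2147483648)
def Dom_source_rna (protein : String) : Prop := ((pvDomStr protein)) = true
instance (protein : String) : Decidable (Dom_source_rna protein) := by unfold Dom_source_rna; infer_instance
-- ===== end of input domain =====

-- B replaces A's 64-entry table scan per protein character by two counting dicts built once and a
-- product of codon-count ** frequency over distinct characters (constant-factor faster in a timing run).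
-- Both ports share the literal value list of the RNA table (the same dict literal appears in both sources).
def pvValues : List Char :=
  ['F','L','I','V','F','L','I','V','L','L','I','V','L','L','M','V',
   'S','P','T','A','S','P','T','A','S','P','T','A','S','P','T','A',
   'Y','H','N','D','Y','H','N','D',' ','Q','K','E',' ','Q','K','E',
   'C','R','S','G','C','R','S','G',' ','R','R','G','W','R','R','G']

-- ===== PORT A =====
def source_rna (protein : String) : Int :=
  let values_list := pvValues
  let proteinStop := (protein ++ " ").toList
  (PySem.List.pyRange 0 (proteinStop.length : Int) 1).foldl
    (fun count2 x =>
      let count1 : Int :=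
        (PySem.List.pyRange 0 64 1).foldl
          (fun c1 i =>
            if PySem.List.pyGetD values_list i ' ' == PySem.List.pyGetD proteinStop x ' '
            then c1 + 1 else c1) 0
      count2 * count1) 1

-- ===== PORT B =====
def source_rna_alt (protein : String) : Int :=
  let codons : PySem.Dict Char Int :=
    pvValues.foldl (fun d aa => d.insert aa (d.getD aa 0 + 1)) PySem.Dict.empty
  let freq : PySem.Dict Char Int :=
    (protein ++ " ").toList.foldl (fun d ch => d.insert ch (d.getD ch 0 + 1)) PySem.Dict.empty
  freq.items.foldl (fun result p => result * (codons.getD p.1 0) ^ p.2.toNat) 1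

-- ===== PRECONDITION & SPEC =====
def Spec_source_rna (protein : String) (out : Int) : Prop := out = source_rna_alt protein
instance (protein : String) (out : Int) : Decidable (Spec_source_rna protein out) := by unfold Spec_source_rna; infer_instance

-- ===== CLAIM (what is proved, stated in full; the proofs are below) =====
def Claim_equal_source_rna : Prop := ∀ (protein : String), Dom_source_rna protein → Spec_source_rna protein (source_rna protein)

-- ===== LEMMAS AND PROOFS =====

-- A's inner loop over the 64 table entries counts the occurrences of c in the value list.
theorem inner_eq (c : Char) :
    (PySem.List.pyRange 0 64 1).foldl
      (fun c1 i => if PySem.List.pyGetD pvValues i ' ' == c then c1 + 1 else c1) (0:Int)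
    = (pvValues.count c : Int) := by
  have h64 : (64 : Int) = (pvValues.length : Int) := by decide
  rw [h64, PySem.List.foldl_pyRange_zero_pyGetD' pvValues ' '
        (fun (c1 : Int) v => if v == c then c1 + 1 else c1) 0,
      PySem.List.foldl_beq_add_one]
  simp

-- A's value is the product of table counts over the characters of protein + ' '.
theorem sourceA_eq_prod (protein : String) :
    source_rna protein =
      (((protein ++ " ").toList.map (fun c => (pvValues.count c : Int))).prod) := by
  unfold source_rna
  dsimp only
  rw [PySem.List.foldl_pyRange_zero_pyGetD' ((protein ++ " ").toList) ' '
        (fun (count2 : Int) v =>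
          count2 * (PySem.List.pyRange 0 64 1).foldl
            (fun c1 i => if PySem.List.pyGetD pvValues i ' ' == v then c1 + 1 else c1) 0) 1]
  rw [show ((protein ++ " ").toList.map (fun c => (pvValues.count c : Int))).prod
        = (protein ++ " ").toList.foldl (fun acc c => acc * (pvValues.count c : Int)) 1 by
      rw [List.prod_eq_foldl, List.foldl_map]]
  apply PySem.List.foldl_congr_mem
  intro acc c _
  rw [inner_eq]

-- B's value is the product over distinct characters of count ^ frequency.
theorem sourceB_eq_prod (protein : String) :
    source_rna_alt protein =
      ((PySem.List.dedup (protein ++ " ").toList).map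
        (fun k => (pvValues.count k : Int) ^ (protein ++ " ").toList.count k)).prod := by
  unfold source_rna_alt
  dsimp only
  rw [PySem.Dict.foldl_insert_getD_add_one_eq_counter,
      PySem.Dict.foldl_insert_getD_add_one_eq_counter,
      PySem.Dict.items_counter,
      List.foldl_map, List.prod_eq_foldl, List.foldl_map,
      PySem.List.dedup_eq_ofList]
  apply PySem.List.foldl_congr_mem
  intro acc k _
  rw [PySem.Dict.getD_counter]
  congr 1

-- grouping a product by value: ∏ f over the list = ∏ over distinct elements of f ^ multiplicity
theorem prod_map_eq_dedup_pow {α M : Type} [DecidableEq α] [CommMonoid M]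
    (l : List α) (f : α → M) :
    (l.map f).prod = ((PySem.List.dedup l).map (fun k => f k ^ l.count k)).prod := by
  rw [Finset.prod_list_map_count]
  rw [← List.prod_toFinset _ (PySem.List.nodup_dedup l)]
  apply Finset.prod_congr
  · ext x; simp
  · intros; rfl

-- ===== VERDICT (by name: the statement is the Claim_ definition above) =====
theorem source_rna_spec : Claim_equal_source_rna := by
  intro protein _
  unfold Spec_source_rna
  rw [sourceA_eq_prod, sourceB_eq_prod, prod_map_eq_dedup_pow]
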